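-- pv_equiv track=rewrite | github.com/vcentfu/MeshGenerat | Code_mailage.py | grille_non_reg
-- ===== SOURCE A (Python) =====
-- def grille_non_reg(L, l, c):
--
--     """ int * int * int -> list[tuple(int)]
--
--         Retourne une grille non reguliere contenant un sous carre. """
--
--     nb_Lc = int(L / c)
--     nb_lc = int(l / c)
--     grille = []
--
--     for y in range(nb_lc + 1):
--         for x in range(nb_Lc + 1):
--             grille.append((x * c, y * c))
--
--         if nb_Lc != L / c :
--             grille.append((L, y * c))
--
--     if nb_lc != l / c :
--         for x in range(nb_Lc + 1):
--             grille.append((x * c, l))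
--
--         if nb_Lc != L / c :
--             grille.append((L, l))
--
--     return grille
-- ===== SOURCE B (Python) =====
-- def grille_non_reg(L, l, c):
--     r = int(l / c)
--     ys = [y * c for y in range(r + 1)] + ([l] if r != l / c else [])
--     if not ys:
--         return []
--     q = int(L / c)
--     xs = [x * c for x in range(q + 1)] + ([L] if q != L / c else [])
--     return [(x, y) for y in ys for x in xs]
-- ===== Notes on version B (the rewrite author's own statement) =====
-- stated objective: simpler
-- what changed: B precomputes the two coordinate axes (x-values and y-values, each with the optional boundary L/l appended once) and emits the grid as their row-major Cartesian product in one comprehension, instead of A's nested loops with conditional boundary appends repeated inside every row and a duplicated extra-row block.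
-- outside the precondition, e.g. on grille_non_reg(4, 4, 0): A raises ZeroDivisionError, B raises ZeroDivisionError
import Mathlib
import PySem

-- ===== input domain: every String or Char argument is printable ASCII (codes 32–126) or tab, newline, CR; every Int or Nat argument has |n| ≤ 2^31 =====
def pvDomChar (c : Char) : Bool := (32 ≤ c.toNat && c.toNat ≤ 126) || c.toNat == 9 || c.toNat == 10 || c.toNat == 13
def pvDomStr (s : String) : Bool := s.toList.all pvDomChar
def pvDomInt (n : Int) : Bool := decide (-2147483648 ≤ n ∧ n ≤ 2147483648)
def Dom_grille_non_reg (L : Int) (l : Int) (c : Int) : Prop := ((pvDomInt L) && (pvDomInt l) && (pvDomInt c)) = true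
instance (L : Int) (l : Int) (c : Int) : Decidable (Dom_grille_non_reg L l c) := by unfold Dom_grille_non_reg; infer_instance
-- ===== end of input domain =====

-- B precomputes the two coordinate axes and returns their row-major Cartesian product
-- in one pass, instead of A's nested loops with per-row conditional boundary appends.


-- ===== PORT A =====
-- Float note: on Dom (|n| ≤ 2^31 < 2^53) Python's int(L / c) equals truncating
-- integer division (Int.tdiv), and the float comparison `nb_Lc != L / c` holds
-- exactly when c does not divide L (i.e. L % c ≠ 0); the port is exact there.
def grille_non_reg (L : Int) (l : Int) (c : Int) : List (Int × Int) :=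
  let nb_Lc := Int.tdiv L c
  let nb_lc := Int.tdiv l c
  let grille : List (Int × Int) :=
    (PySem.List.pyRange 0 (nb_lc + 1) 1).foldl (fun g y =>
      let g := (PySem.List.pyRange 0 (nb_Lc + 1) 1).foldl (fun g x => g ++ [(x * c, y * c)]) g
      if L % c ≠ 0 then g ++ [(L, y * c)] else g) []
  if l % c ≠ 0 then
    let grille := (PySem.List.pyRange 0 (nb_Lc + 1) 1).foldl (fun g x => g ++ [(x * c, l)]) grille
    if L % c ≠ 0 then grille ++ [(L, l)] else grille
  else grille

-- ===== PORT B =====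
def grille_non_reg_alt (L : Int) (l : Int) (c : Int) : List (Int × Int) :=
  let r := Int.tdiv l c
  let ys := (PySem.List.pyRange 0 (r + 1) 1).map (fun y => y * c) ++ (if l % c ≠ 0 then [l] else [])
  if ys = [] then []
  else
    let q := Int.tdiv L c
    let xs := (PySem.List.pyRange 0 (q + 1) 1).map (fun x => x * c) ++ (if L % c ≠ 0 then [L] else [])
    ys.flatMap (fun y => xs.map (fun x => (x, y)))

-- ===== PRECONDITION & SPEC =====
-- Pre_ excludes only c = 0, on which A raises ZeroDivisionError.
def Pre_grille_non_reg (L : Int) (l : Int) (c : Int) : Prop := c ≠ 0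
instance (L : Int) (l : Int) (c : Int) : Decidable (Pre_grille_non_reg L l c) := by unfold Pre_grille_non_reg; infer_instance
def pvWitness_grille_non_reg : Int × Int × Int := (7, 5, 2)

def Spec_grille_non_reg (L : Int) (l : Int) (c : Int) (out : List (Int × Int)) : Prop := out = grille_non_reg_alt L l c
instance (L : Int) (l : Int) (c : Int) (out : List (Int × Int)) : Decidable (Spec_grille_non_reg L l c out) := by unfold Spec_grille_non_reg; infer_instance

-- ===== CLAIM (what is proved, stated in full; the proofs are below) =====
def Claim_equal_grille_non_reg : Prop := ∀ (L : Int) (l : Int) (c : Int), Dom_grille_non_reg L l c → Pre_grille_non_reg L l c → Spec_grille_non_reg L l c (grille_non_reg L l c)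

-- ===== LEMMAS AND PROOFS =====
lemma foldl_snoc_map {α β : Type} (f : α → β) (xs : List α) (g : List β) :
    xs.foldl (fun g x => g ++ [f x]) g = g ++ xs.map f := by
  induction xs generalizing g with
  | nil => simp
  | cons a t ih => simp [List.foldl_cons, ih]

lemma foldl_rowlem {α β : Type} (row : α → List β) (ys : List α) (g : List β) :
    ys.foldl (fun g y => g ++ row y) g = g ++ ys.flatMap row := by
  induction ys generalizing g with
  | nil => simp
  | cons a t ih => simp [List.foldl_cons, ih]

-- ===== VERDICT (by name: the statement is the Claim_ definition above) =====
theorem grille_non_reg_spec : Claim_equal_grille_non_reg := by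
  intro L l c _ _
  unfold Spec_grille_non_reg grille_non_reg grille_non_reg_alt
  simp only []
  rw [show ∀ (ys : List Int) (f : Int → List (Int × Int)),
        (if ys = [] then ([] : List (Int × Int)) else ys.flatMap f) = ys.flatMap f from by
      intro ys f; split <;> simp_all]
  set rX := PySem.List.pyRange 0 (Int.tdiv L c + 1) 1 with hrX
  set rY := PySem.List.pyRange 0 (Int.tdiv l c + 1) 1 with hrY
  set xs : List Int := rX.map (fun x => x * c) ++ (if L % c ≠ 0 then [L] else []) with hxs
  -- one row of A, at ordinate y', equals B's x-axis paired with y'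
  have hrow : ∀ (g : List (Int × Int)) (y' : Int),
      (if L % c ≠ 0 then (rX.foldl (fun g x => g ++ [(x * c, y')]) g) ++ [(L, y')]
       else rX.foldl (fun g x => g ++ [(x * c, y')]) g)
      = g ++ xs.map (fun x => (x, y')) := by
    intro g y'
    rw [hxs]
    by_cases h : L % c ≠ 0 <;>
      simp [h, foldl_snoc_map (fun x => (x * c, y')), List.map_map, Function.comp]
  have hmain : (rY.foldl (fun g y =>
      let g := rX.foldl (fun g x => g ++ [(x * c, y * c)]) g
      if L % c ≠ 0 then g ++ [(L, y * c)] else g) ([] : List (Int × Int)))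
      = rY.flatMap (fun y => xs.map (fun x => (x, y * c))) := by
    have : (fun (g : List (Int × Int)) (y : Int) =>
        let g := rX.foldl (fun g x => g ++ [(x * c, y * c)]) g
        if L % c ≠ 0 then g ++ [(L, y * c)] else g)
        = fun g y => g ++ xs.map (fun x => (x, y * c)) := by
      funext g y; exact hrow g (y * c)
    rw [this, foldl_rowlem]; simp
  rw [hmain]
  have hB : ((rY.map (fun y => y * c) ++ (if l % c ≠ 0 then [l] else [])).flatMap
      (fun y => xs.map (fun x => (x, y))))
      = rY.flatMap (fun y => xs.map (fun x => (x, y * c)))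
        ++ (if l % c ≠ 0 then xs.map (fun x => (x, l)) else []) := by
    rw [List.flatMap_append, List.flatMap_map]
    by_cases h : l % c ≠ 0 <;> simp [h]
  rw [hB]
  by_cases hl : l % c ≠ 0
  · rw [if_pos hl, if_pos hl]
    exact hrow _ l
  · rw [if_neg hl, if_neg hl]
    exact (List.append_nil _).symm
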